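-- pv_equiv track=rewrite | github.com/Bsting118/DefeatureModel | defeatureModel_UpgradedSourceCode_V2/defeatureModel.py | getFirstLetterIndex
-- ===== SOURCE A (Python) =====
-- def getFirstLetterIndex(string):
--     #Initialize index and format string to make checking easier (more flexible)
--     string = string.lower()
--     indexOfLetter = 0
--
--     # Scan through the string with index and find first alphabet instance
--     for index, char in enumerate(string):
--         if (char == "a" or char == "b" or char == "c" or char == "d" or char == "e" or char == "f" or char == "g" or
--             char == "h" or char == "i" or char == "j" or char == "k" or char == "l" or char == "m" or char == "n" or
--             char == "o" or char == "p" or char == "q" or char == "r" or char == "s" or char == "t" or char == "u" or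
--             char == "v" or char == "w" or char == "x" or char == "y" or char == "z"):
--             indexOfLetter = index
--             break
--
--     return indexOfLetter
-- ===== SOURCE B (Python) =====
-- def getFirstLetterIndex(string):
--     # 26 staged passes: for each letter find its first occurrence, then take the
--     # minimum of the occurrence positions; 0 when no letter occurs at all.
--     lowered = string.lower()
--     hits = [p for p in (lowered.find(c) for c in "abcdefghijklmnopqrstuvwxyz") if p != -1]
--     return min(hits) if hits else 0
-- ===== Notes on version B (the rewrite author's own statement) =====
-- stated objective: alternative
-- what changed: Instead of one left-to-right scan with a 26-way or-chain and break bookkeeping, B runs one str.find pass per letter of the alphabet and returns the minimum of the found positions (0 when no letter occurs), i.e. a per-needle staged-pass + min reduction rather than a single character-class scan.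
import Mathlib
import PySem

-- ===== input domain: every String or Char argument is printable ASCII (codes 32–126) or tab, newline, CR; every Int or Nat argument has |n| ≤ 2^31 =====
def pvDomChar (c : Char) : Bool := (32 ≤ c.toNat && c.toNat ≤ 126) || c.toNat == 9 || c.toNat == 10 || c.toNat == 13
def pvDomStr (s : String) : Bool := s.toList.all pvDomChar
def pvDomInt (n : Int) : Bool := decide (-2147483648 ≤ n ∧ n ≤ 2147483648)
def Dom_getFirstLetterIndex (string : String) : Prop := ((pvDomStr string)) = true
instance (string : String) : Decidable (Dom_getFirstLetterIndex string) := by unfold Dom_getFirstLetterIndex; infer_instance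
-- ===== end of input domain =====

-- B replaces A's single scan (26-way or-chain with break bookkeeping) by one str.find pass
-- per letter of the alphabet followed by a min over the found positions (alternative, same cost class).

-- ===== PORT A =====
-- the 26-way or-chain of A, verbatim
def pvIsAZ (char : Char) : Bool :=
  char == 'a' || char == 'b' || char == 'c' || char == 'd' || char == 'e' || char == 'f' || char == 'g' ||
  char == 'h' || char == 'i' || char == 'j' || char == 'k' || char == 'l' || char == 'm' || char == 'n' ||
  char == 'o' || char == 'p' || char == 'q' || char == 'r' || char == 's' || char == 't' || char == 'u' ||
  char == 'v' || char == 'w' || char == 'x' || char == 'y' || char == 'z'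

-- the for-loop over enumerate(string) with break: first matching index wins, default 0
def pvALoop : List (Int × Char) → Int
  | [] => 0
  | (index, char) :: rest => if pvIsAZ char then index else pvALoop rest

def getFirstLetterIndex (string : String) : Int :=
  pvALoop (PySem.List.enumerate (PySem.Str.lower string).toList 0)

-- ===== PORT B =====
-- the alphabet Source B iterates over ("abcdefghijklmnopqrstuvwxyz")
def pvLetters : List Char :=
  ['a','b','c','d','e','f','g','h','i','j','k','l','m',
   'n','o','p','q','r','s','t','u','v','w','x','y','z']

-- hits = [p for p in (lowered.find(c) for c in letters) if p != -1]; min(hits) if hits else 0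
def getFirstLetterIndex_alt (string : String) : Int :=
  let lowered := PySem.Str.lower string
  let hits := (pvLetters.map (fun c => PySem.Str.find lowered (String.ofList [c]))).filter (fun p => p != -1)
  match PySem.List.min? hits (fun x => x) with
  | some m => m
  | none => 0

-- ===== PRECONDITION & SPEC =====
def Spec_getFirstLetterIndex (string : String) (out : Int) : Prop := out = getFirstLetterIndex_alt string
instance (string : String) (out : Int) : Decidable (Spec_getFirstLetterIndex string out) := by unfold Spec_getFirstLetterIndex; infer_instance

-- ===== CLAIM (what is proved, stated in full; the proofs are below) =====
def Claim_equal_getFirstLetterIndex : Prop := ∀ (string : String), Dom_getFirstLetterIndex string → Spec_getFirstLetterIndex string (getFirstLetterIndex string)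

-- ===== LEMMAS AND PROOFS =====

theorem char_eq_iff (c d : Char) : c = d ↔ c.toNat = d.toNat :=
  ⟨fun h => h ▸ rfl, fun h => Char.ext (UInt32.toNat_inj.mp h)⟩

-- A's 26-way or-chain is exactly membership in Source B's alphabet string
theorem pvIsAZ_iff_mem (c : Char) : pvIsAZ c = true ↔ c ∈ pvLetters := by
  simp only [pvIsAZ, pvLetters, Bool.or_eq_true, beq_iff_eq, List.mem_cons, List.not_mem_nil, or_false,
    char_eq_iff, Char.reduceToNat]
  omega

-- A's break-loop over enumerate computes the first index satisfying the predicate (default 0)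
theorem pvALoop_enumerate (l : List Char) (n : Int) :
    pvALoop (PySem.List.enumerate l n) =
      match l.findIdx? pvIsAZ with
      | some i => n + (i : Int)
      | none => 0 := by
  induction l generalizing n with
  | nil => simp [pvALoop, PySem.List.enumerate_nil]
  | cons c rest ih =>
    rw [PySem.List.enumerate_cons, List.findIdx?_cons]
    by_cases hc : pvIsAZ c = true
    · simp [pvALoop, hc]
    · simp only [Bool.not_eq_true] at hc
      simp only [pvALoop, hc, if_false, Bool.false_eq_true, ih (n + 1)]
      cases hfi : rest.findIdx? pvIsAZ with
      | none => simp
      | some i => simp; ring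

-- a singleton is an infix of l iff its character is an element of l
theorem singleton_infix_iff {c : Char} {l : List Char} : [c] <:+: l ↔ c ∈ l := by
  constructor
  · intro h; exact h.sublist.subset (List.mem_singleton_self c)
  · intro h
    obtain ⟨s, t, rfl⟩ := List.append_of_mem h
    exact ⟨s, t, by simp⟩

-- a singleton is a prefix of l.drop j iff l[j]? is that character
theorem singleton_prefix_drop_iff {c : Char} {l : List Char} {j : Nat} :
    [c] <+: l.drop j ↔ l[j]? = some c := by
  rw [← List.head?_drop]
  cases hd : l.drop j with
  | nil => simp
  | cons a t => simp [List.cons_prefix_cons, eq_comm]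

-- find l [c] for a character c present in l is exactly c's first index in l
theorem find_singleton_spec {c : Char} {l : List Char} (h : PySem.Chars.find l [c] ≠ -1) :
    ∃ j : Nat, PySem.Chars.find l [c] = (j : Int) ∧ l[j]? = some c ∧ ∀ i < j, l[i]? ≠ some c := by
  have h0 : 0 ≤ PySem.Chars.find l [c] := by
    have := PySem.Chars.neg_one_le_find (s := l) (sub := [c]); omega
  obtain ⟨hpre, hmin⟩ := PySem.Chars.find_spec (s := l) (sub := [c]) h0
  refine ⟨(PySem.Chars.find l [c]).toNat, by omega, singleton_prefix_drop_iff.mp hpre, ?_⟩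
  intro i hi hci
  exact hmin i hi (singleton_prefix_drop_iff.mpr hci)

-- ===== VERDICT (by name: the statement is the Claim_ definition above) =====
theorem getFirstLetterIndex_spec : Claim_equal_getFirstLetterIndex := by
  intro s _
  unfold Spec_getFirstLetterIndex getFirstLetterIndex getFirstLetterIndex_alt
  rw [pvALoop_enumerate]
  simp only [PySem.Str.find_eq, String.toList_ofList]
  set l := (PySem.Str.lower s).toList with hl
  cases hfi : l.findIdx? pvIsAZ with
  | none =>
    have hnone := List.findIdx?_eq_none_iff.mp hfi
    have hfilter : (pvLetters.map (fun c => PySem.Chars.find l [c])).filter (fun p => p != -1) = [] := by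
      rw [List.filter_eq_nil_iff]
      intro p hp
      obtain ⟨c, hc, rfl⟩ := List.mem_map.mp hp
      have hfc : PySem.Chars.find l [c] = -1 := by
        rw [PySem.Chars.find_eq_neg_one_iff]
        intro hinf
        exact absurd ((pvIsAZ_iff_mem c).mpr hc) (by simpa using hnone c (singleton_infix_iff.mp hinf))
      simp [hfc]
    simp [hfilter, PySem.List.min?]
  | some i =>
    obtain ⟨hlen, hp, hmin⟩ := List.findIdx?_eq_some_iff_getElem.mp hfi
    have hub : ∀ p ∈ (pvLetters.map (fun c => PySem.Chars.find l [c])).filter (fun p => p != -1),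
        (i : Int) ≤ p := by
      intro p hp'
      obtain ⟨hp1, hp2⟩ := List.mem_filter.mp hp'
      obtain ⟨c, hc, rfl⟩ := List.mem_map.mp hp1
      have hne : PySem.Chars.find l [c] ≠ -1 := by simpa using hp2
      obtain ⟨j, hj, hjc, _⟩ := find_singleton_spec hne
      rw [hj]
      have hjl : j < l.length := (List.getElem?_eq_some_iff.mp hjc).1
      by_contra hlt
      have hji : j < i := by omega
      apply hmin j hji
      have hlc : l[j] = c := by simpa [List.getElem?_eq_getElem hjl] using hjc
      rw [hlc]
      exact (pvIsAZ_iff_mem c).mpr hc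
    have hc0 : l[i] ∈ pvLetters := (pvIsAZ_iff_mem _).mp hp
    have hfind : PySem.Chars.find l [l[i]] = (i : Int) := by
      have hne : PySem.Chars.find l [l[i]] ≠ -1 := by
        rw [Ne, PySem.Chars.find_eq_neg_one_iff, not_not]
        exact singleton_infix_iff.mpr (List.getElem_mem hlen)
      obtain ⟨j, hj, hjc, hjmin⟩ := find_singleton_spec hne
      have hji : j ≤ i := by
        by_contra h'
        exact hjmin i (by omega) (by simp [List.getElem?_eq_getElem hlen])
      have hij : i ≤ j := by
        by_contra h'
        have hjl : j < l.length := by omega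
        apply hmin j (by omega)
        have hlc : l[j] = l[i] := by simpa [List.getElem?_eq_getElem hjl] using hjc
        rw [hlc]; exact hp
      rw [hj, le_antisymm hji hij]
    have hmem : (i : Int) ∈ (pvLetters.map (fun c => PySem.Chars.find l [c])).filter (fun p => p != -1) := by
      refine List.mem_filter.mpr ⟨List.mem_map.mpr ⟨l[i], hc0, hfind⟩, by simp⟩
    cases hm : PySem.List.min? ((pvLetters.map (fun c => PySem.Chars.find l [c])).filter (fun p => p != -1)) (fun x => x) with
    | none =>
      rw [PySem.List.min?_eq_none_iff] at hm
      rw [hm] at hmem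
      simp at hmem
    | some m =>
      have h1 : (i : Int) ≤ m := hub m (PySem.List.min?_mem hm)
      have h2 : m ≤ (i : Int) := PySem.List.min?_isMin hm _ hmem
      show (0 + (i : Int)) = m
      omega
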